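-- pv_equiv track=rewrite | github.com/allanRoberto/revesbot-final | apps/signals/patterns/sequencia_terminal.py | get_numbers_by_terminal
-- ===== SOURCE A (Python) =====
-- def get_numbers_by_terminal(terminal):
--     """
--     Retorna todos os números da roleta que terminam com o mesmo dígito do terminal
--
--     Args:
--         terminal (int): O número terminal (0-9)
--
--     Returns:
--         list: Lista com todos os números que terminam com o terminal
--     """
--     # Números da roleta europeia (0-36)
--     roulette_numbers = list(range(0, 37))
--
--     # Encontra todos os números que terminam com o mesmo dígito
--     terminal_digit = terminal % 10
--     numbers_with_terminal = []
--
--     for number in roulette_numbers: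
--         if number % 10 == terminal_digit:
--             numbers_with_terminal.append(number)
--
--     return numbers_with_terminal
-- ===== SOURCE B (Python) =====
-- def get_numbers_by_terminal(terminal):
--     d = terminal % 10
--     return list(range(d, 37, 10))
-- ===== Notes on version B (the rewrite author's own statement) =====
-- stated objective: simpler
-- what changed: Replaces the scan over every roulette number with a per-element modulo test by directly generating the arithmetic progression of numbers ending in the terminal digit with a strided range.
import Mathlib
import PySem

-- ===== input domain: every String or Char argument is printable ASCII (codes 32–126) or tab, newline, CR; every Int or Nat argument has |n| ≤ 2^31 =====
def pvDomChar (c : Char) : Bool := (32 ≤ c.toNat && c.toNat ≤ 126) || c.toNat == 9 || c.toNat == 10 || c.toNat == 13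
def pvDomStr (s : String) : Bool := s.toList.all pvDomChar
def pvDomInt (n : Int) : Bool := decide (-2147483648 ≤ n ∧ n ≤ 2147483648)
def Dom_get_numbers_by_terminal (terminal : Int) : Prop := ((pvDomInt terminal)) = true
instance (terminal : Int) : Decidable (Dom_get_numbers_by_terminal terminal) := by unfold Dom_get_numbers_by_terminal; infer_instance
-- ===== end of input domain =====

-- B generates the matching numbers directly as range(terminal % 10, 37, 10) instead of filtering 0..36 (objective: simpler).

-- ===== PORT A =====
def get_numbers_by_terminal (terminal : Int) : List Int :=
  let roulette_numbers := PySem.List.pyRange 0 37 1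
  let terminal_digit := PySem.Int.mod terminal 10
  roulette_numbers.foldl
    (fun acc number =>
      if PySem.Int.mod number 10 = terminal_digit then acc ++ [number] else acc)
    []

-- ===== PORT B =====
def get_numbers_by_terminal_alt (terminal : Int) : List Int :=
  let d := PySem.Int.mod terminal 10
  PySem.List.pyRange d 37 10

-- ===== PRECONDITION & SPEC =====
def Spec_get_numbers_by_terminal (terminal : Int) (out : List Int) : Prop := out = get_numbers_by_terminal_alt terminal
instance (terminal : Int) (out : List Int) : Decidable (Spec_get_numbers_by_terminal terminal out) := by unfold Spec_get_numbers_by_terminal; infer_instance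

-- ===== CLAIM (what is proved, stated in full; the proofs are below) =====
def Claim_equal_get_numbers_by_terminal : Prop := ∀ (terminal : Int), Dom_get_numbers_by_terminal terminal → Spec_get_numbers_by_terminal terminal (get_numbers_by_terminal terminal)

-- ===== LEMMAS AND PROOFS =====

-- Both ports depend on terminal only through terminal % 10, which lies in 0..9;
-- the ten resulting closed instances are checked by `decide`.
theorem pv_case (d : Int) (h0 : 0 ≤ d) (h9 : d < 10) :
    (PySem.List.pyRange 0 37 1).foldl
      (fun acc number =>
        if PySem.Int.mod number 10 = d then acc ++ [number] else acc) []
      = PySem.List.pyRange d 37 10 := by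
  interval_cases d <;> decide

-- ===== VERDICT (by name: the statement is the Claim_ definition above) =====
theorem get_numbers_by_terminal_spec : Claim_equal_get_numbers_by_terminal := by
  intro terminal _
  unfold Spec_get_numbers_by_terminal get_numbers_by_terminal get_numbers_by_terminal_alt
  exact pv_case _ (PySem.Int.mod_nonneg terminal (by norm_num)) (PySem.Int.mod_lt terminal (by norm_num))
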